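-- pv_equiv track=rewrite | github.com/Wu-Jiafeng/KGQA_Intelligent_Manufacturing | NER/utils.py | outputWithTagScheme
-- ===== SOURCE A (Python) =====
-- def outputWithTagScheme(input_list, label, tagScheme="BMES"):
--     output_list = []
--     list_length = len(input_list)
--     if tagScheme=="BMES":
--         if list_length ==1:
--             pair = input_list[0]+ ' ' + 'S-' + label + '\n'
--             output_list.append(pair)#.encode('utf-8'))
--         else:
--             for idx in range(list_length):
--                 if idx == 0:
--                     pair = input_list[idx]+ ' ' + 'B-' + label + '\n'
--                 elif idx == list_length -1:
--                     pair = input_list[idx]+ ' ' + 'E-' + label + '\n'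
--                 else:
--                     pair = input_list[idx]+ ' ' + 'M-' + label + '\n'
--                 output_list.append(pair)#.encode('utf-8'))
--     elif tagScheme=="BIOES":
--         if list_length ==1:
--             pair = input_list[0]+ ' ' + 'S-' + label + '\n'
--             output_list.append(pair)#.encode('utf-8'))
--         else:
--             for idx in range(list_length):
--                 if idx == 0:
--                     pair = input_list[idx]+ ' ' + 'B-' + label + '\n'
--                 elif idx == list_length -1:
--                     pair = input_list[idx]+ ' ' + 'E-' + label + '\n'
--                 else:
--                     pair = input_list[idx]+ ' ' + 'I-' + label + '\n'
--                 output_list.append(pair)#.encode('utf-8'))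
--     else:
--         for idx in range(list_length):
--             if idx == 0:
--                 pair = input_list[idx]+ ' ' + 'B-' + label + '\n'
--             else:
--                 pair = input_list[idx]+ ' ' + 'I-' + label + '\n'
--             output_list.append(pair)#.encode('utf-8'))
--     return output_list
-- ===== SOURCE B (Python) =====
-- def outputWithTagScheme(input_list, label, tagScheme="BMES"):
--     # Streaming one-token-lookahead state machine: a token's tag is decided only
--     # once we know whether another token follows it (no indices, no len()).
--     ses = tagScheme == "BMES" or tagScheme == "BIOES"
--     single = "S" if ses else "B"
--     mid = "M" if tagScheme == "BMES" else "I"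
--     end = "E" if ses else "I"
--     out = []
--     it = iter(input_list)
--     prev = next(it, None)
--     if prev is None:
--         return out
--     at_start = True
--     for cur in it:
--         out.append(prev + " " + ("B" if at_start else mid) + "-" + label + "\n")
--         prev, at_start = cur, False
--     out.append(prev + " " + (single if at_start else end) + "-" + label + "\n")
--     return out
-- ===== Notes on version B (the rewrite author's own statement) =====
-- stated objective: simpler
-- what changed: Replaces the three duplicated index-vs-length branching loops by a single streaming one-token-lookahead state machine: each token's prefix is emitted only when it is known whether another token follows, with the scheme reduced to a (single, mid, end) letter triple computed once.
import Mathlib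
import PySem

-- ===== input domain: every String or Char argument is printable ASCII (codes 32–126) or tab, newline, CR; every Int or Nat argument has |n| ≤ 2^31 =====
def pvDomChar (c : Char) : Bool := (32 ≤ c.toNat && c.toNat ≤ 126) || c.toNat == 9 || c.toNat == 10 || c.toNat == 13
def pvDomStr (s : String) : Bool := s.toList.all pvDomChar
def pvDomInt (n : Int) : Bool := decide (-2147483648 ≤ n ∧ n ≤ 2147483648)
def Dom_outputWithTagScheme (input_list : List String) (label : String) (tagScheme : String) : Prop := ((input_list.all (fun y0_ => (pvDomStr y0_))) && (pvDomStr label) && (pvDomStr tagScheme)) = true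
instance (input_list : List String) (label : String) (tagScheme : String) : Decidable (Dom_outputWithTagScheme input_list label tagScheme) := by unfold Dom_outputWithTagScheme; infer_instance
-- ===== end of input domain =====

-- B replaces A's three duplicated index-vs-length branching loops by a single streaming
-- one-token-lookahead state machine over the scheme's (single, mid, end) letters (objective: simpler).

-- ===== PORT A =====
def outputWithTagScheme (input_list : List String) (label : String) (tagScheme : String) : List String :=
  let list_length : Int := input_list.length
  if tagScheme == "BMES" then
    if list_length == 1 then
      [PySem.List.pyGetD input_list 0 "" ++ " " ++ "S-" ++ label ++ "\n"]
    else
      (PySem.List.pyRange 0 list_length 1).foldl (fun acc idx =>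
        acc ++ [if idx == 0 then PySem.List.pyGetD input_list idx "" ++ " " ++ "B-" ++ label ++ "\n"
                else if idx == list_length - 1 then PySem.List.pyGetD input_list idx "" ++ " " ++ "E-" ++ label ++ "\n"
                else PySem.List.pyGetD input_list idx "" ++ " " ++ "M-" ++ label ++ "\n"]) []
  else if tagScheme == "BIOES" then
    if list_length == 1 then
      [PySem.List.pyGetD input_list 0 "" ++ " " ++ "S-" ++ label ++ "\n"]
    else
      (PySem.List.pyRange 0 list_length 1).foldl (fun acc idx =>
        acc ++ [if idx == 0 then PySem.List.pyGetD input_list idx "" ++ " " ++ "B-" ++ label ++ "\n"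
                else if idx == list_length - 1 then PySem.List.pyGetD input_list idx "" ++ " " ++ "E-" ++ label ++ "\n"
                else PySem.List.pyGetD input_list idx "" ++ " " ++ "I-" ++ label ++ "\n"]) []
  else
    (PySem.List.pyRange 0 list_length 1).foldl (fun acc idx =>
      acc ++ [if idx == 0 then PySem.List.pyGetD input_list idx "" ++ " " ++ "B-" ++ label ++ "\n"
              else PySem.List.pyGetD input_list idx "" ++ " " ++ "I-" ++ label ++ "\n"]) []

-- ===== PORT B =====
-- the lookahead loop of Source B: `prev` is the token awaiting its tag, `atStart` whether it is the first
def owtGo (label mid fin single : String) : Bool → String → List String → List String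
  | atStart, prev, [] =>
      [prev ++ " " ++ (if atStart then single else fin) ++ "-" ++ label ++ "\n"]
  | atStart, prev, cur :: rest =>
      (prev ++ " " ++ (if atStart then "B" else mid) ++ "-" ++ label ++ "\n") ::
        owtGo label mid fin single false cur rest

def outputWithTagScheme_alt (input_list : List String) (label : String) (tagScheme : String) : List String :=
  let ses := tagScheme == "BMES" || tagScheme == "BIOES"
  let single := if ses then "S" else "B"
  let mid := if tagScheme == "BMES" then "M" else "I"
  let fin := if ses then "E" else "I"
  match input_list with
  | [] => []
  | x :: rest => owtGo label mid fin single true x rest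

-- ===== PRECONDITION & SPEC =====
def Spec_outputWithTagScheme (input_list : List String) (label : String) (tagScheme : String) (out : List String) : Prop := out = outputWithTagScheme_alt input_list label tagScheme
instance (input_list : List String) (label : String) (tagScheme : String) (out : List String) : Decidable (Spec_outputWithTagScheme input_list label tagScheme out) := by unfold Spec_outputWithTagScheme; infer_instance

-- ===== CLAIM (what is proved, stated in full; the proofs are below) =====
def Claim_equal_outputWithTagScheme : Prop := ∀ (input_list : List String) (label : String) (tagScheme : String), Dom_outputWithTagScheme input_list label tagScheme → Spec_outputWithTagScheme input_list label tagScheme (outputWithTagScheme input_list label tagScheme)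

-- ===== LEMMAS AND PROOFS =====

lemma owtGo_length (l m f s : String) : ∀ (xs : List String) (b : Bool) (prev : String),
    (owtGo l m f s b prev xs).length = xs.length + 1 := by
  intro xs
  induction xs with
  | nil => intro b prev; simp [owtGo]
  | cons c rest ih => intro b prev; simp [owtGo, ih]

lemma owtGo_false_getElem (l m f s : String) : ∀ (xs : List String) (prev : String) (k : Nat)
    (hk : k < xs.length + 1),
    (owtGo l m f s false prev xs)[k]'(by rw [owtGo_length]; omega) =
      (prev :: xs)[k]'(by simpa using hk) ++ " " ++ (if k = xs.length then f else m) ++ "-" ++ l ++ "\n" := by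
  intro xs
  induction xs with
  | nil =>
    intro prev k hk
    match k, hk with
    | 0, _ => simp [owtGo]
  | cons c rest ih =>
    intro prev k hk
    match k with
    | 0 => simp [owtGo]
    | k + 1 =>
      simp only [owtGo, List.getElem_cons_succ]
      rw [ih c k (by simpa using hk)]
      simp only [List.length_cons]
      by_cases he : k = rest.length
      · rw [if_pos he, if_pos (by omega)]
      · rw [if_neg he, if_neg (by omega)]

-- core of the BMES/BIOES length≥2 branches: A's index loop equals B's lookahead machine
lemma core_SE (x c : String) (rest : List String) (lab mid fin single : String)
    (midA finA : String) (hm : midA = mid ++ "-") (hf : finA = fin ++ "-") :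
    (PySem.List.pyRange 0 ((x :: c :: rest).length : Int) 1).foldl (fun acc idx =>
        acc ++ [if idx == 0 then PySem.List.pyGetD (x :: c :: rest) idx "" ++ " " ++ "B-" ++ lab ++ "\n"
                else if idx == ((x :: c :: rest).length : Int) - 1 then PySem.List.pyGetD (x :: c :: rest) idx "" ++ " " ++ finA ++ lab ++ "\n"
                else PySem.List.pyGetD (x :: c :: rest) idx "" ++ " " ++ midA ++ lab ++ "\n"]) []
    = owtGo lab mid fin single true x (c :: rest) := by
  rw [PySem.List.foldl_append_singleton_eq_map, List.nil_append]
  apply List.ext_getElem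
  · simp [PySem.List.length_pyRange_one, owtGo_length]
    omega
  · intro k h1 h2
    have hk : k < (x :: c :: rest).length := by
      simp [PySem.List.length_pyRange_one] at h1
      simp only [List.length_cons]
      omega
    rw [List.getElem_map, PySem.List.getElem_pyRange_one]
    simp only [zero_add]
    rw [PySem.List.pyGetD_eq_getElem _ "" (by omega) (by exact_mod_cast hk)]
    simp only [Int.toNat_natCast]
    match k with
    | 0 =>
      simp only [owtGo, List.getElem_cons_zero, Nat.cast_zero, beq_self_eq_true, if_true]
      rw [show ("B-" : String) = "B" ++ "-" from rfl, ← String.append_assoc]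
    | k + 1 =>
      simp only [owtGo, List.getElem_cons_succ]
      rw [owtGo_false_getElem lab mid fin single rest c k (by simpa using hk)]
      rw [if_neg (by simp; omega)]
      by_cases hl : k = rest.length
      · rw [if_pos (by simp; omega), if_pos hl, hf, ← String.append_assoc]
      · rw [if_neg (by simp; omega), if_neg hl, hm, ← String.append_assoc]

-- core of the default branch (any nonempty list)
lemma core_BI (x : String) (rest : List String) (lab : String) :
    (PySem.List.pyRange 0 ((x :: rest).length : Int) 1).foldl (fun acc idx =>
        acc ++ [if idx == 0 then PySem.List.pyGetD (x :: rest) idx "" ++ " " ++ "B-" ++ lab ++ "\n"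
                else PySem.List.pyGetD (x :: rest) idx "" ++ " " ++ "I-" ++ lab ++ "\n"]) []
    = owtGo lab "I" "I" "B" true x rest := by
  rw [PySem.List.foldl_append_singleton_eq_map, List.nil_append]
  apply List.ext_getElem
  · simp [PySem.List.length_pyRange_one, owtGo_length]
  · intro k h1 h2
    have hk : k < (x :: rest).length := by
      simpa [PySem.List.length_pyRange_one] using h1
    rw [List.getElem_map, PySem.List.getElem_pyRange_one]
    simp only [zero_add]
    rw [PySem.List.pyGetD_eq_getElem _ "" (by omega) (by exact_mod_cast hk)]
    simp only [Int.toNat_natCast]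
    match rest, hk with
    | [], hk =>
      match k, hk with
      | 0, _ =>
        simp only [owtGo, List.getElem_cons_zero, Nat.cast_zero, beq_self_eq_true, if_true]
        rw [show ("B-" : String) = "B" ++ "-" from rfl, ← String.append_assoc]
    | c :: rest, hk =>
      match k with
      | 0 =>
        simp only [owtGo, List.getElem_cons_zero, Nat.cast_zero, beq_self_eq_true, if_true]
        rw [show ("B-" : String) = "B" ++ "-" from rfl, ← String.append_assoc]
      | k + 1 =>
        simp only [owtGo, List.getElem_cons_succ]
        rw [owtGo_false_getElem lab "I" "I" "B" rest c k (by simpa using hk)]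
        rw [if_neg (by simp; omega), show ("I-" : String) = "I" ++ "-" from rfl, ← String.append_assoc]
        split <;> rfl

-- ===== VERDICT (by name: the statement is the Claim_ definition above) =====
theorem outputWithTagScheme_spec : Claim_equal_outputWithTagScheme := by
  intro input_list label tagScheme _
  show _ = _
  unfold outputWithTagScheme outputWithTagScheme_alt
  by_cases hB : tagScheme == "BMES"
  · simp only [hB, Bool.true_or, if_true]
    by_cases h1 : input_list.length = 1
    · obtain ⟨x, hx⟩ : ∃ x, input_list = [x] := by
        match input_list, h1 with
        | [x], _ => exact ⟨x, rfl⟩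
      subst hx
      simp [owtGo, PySem.List.pyGetD]
      rw [String.append_assoc (s₁ := x ++ " ") (s₂ := "S") (s₃ := "-"), show ("S" : String) ++ "-" = "S-" from rfl]
    · have h1' : ¬ ((input_list.length : Int) == 1) = true := by simp; omega
      rw [if_neg (by simpa using h1')]
      match input_list, h1 with
      | [], _ => rfl
      | x :: c :: rest, _ => exact core_SE x c rest label "M" "E" "S" "M-" "E-" rfl rfl
  · by_cases hI : tagScheme == "BIOES"
    · simp only [hB, hI, Bool.false_eq_true, if_false, Bool.false_or, if_true]
      by_cases h1 : input_list.length = 1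
      · obtain ⟨x, hx⟩ : ∃ x, input_list = [x] := by
          match input_list, h1 with
          | [x], _ => exact ⟨x, rfl⟩
        subst hx
        simp [owtGo, PySem.List.pyGetD]
        rw [String.append_assoc (s₁ := x ++ " ") (s₂ := "S") (s₃ := "-"), show ("S" : String) ++ "-" = "S-" from rfl]
      · have h1' : ¬ ((input_list.length : Int) == 1) = true := by simp; omega
        rw [if_neg (by simpa using h1')]
        match input_list, h1 with
        | [], _ => rfl
        | x :: c :: rest, _ => exact core_SE x c rest label "I" "E" "S" "I-" "E-" rfl rfl
    · simp only [hB, hI, Bool.false_eq_true, if_false, Bool.false_or]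
      match input_list with
      | [] => rfl
      | x :: rest => exact core_BI x rest label
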